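-- pv_equiv track=rewrite | github.com/logflux/logflux | src/logflux/molfi.py | calc_missed_logs
-- ===== SOURCE A (Python) =====
-- def match(log_toks, tpl_toks):
--     if len(log_toks) != len(tpl_toks):
--         return False
--     else:
--         for log_tok, tpl_tok in zip(log_toks, tpl_toks):
--             if log_tok != tpl_tok and tpl_tok != None:
--                 return False
--         return True
--
-- def calc_missed_logs(tok_tpls, tok_logs):
--     missed_logs = []
--
--     for tok_log in tok_logs:
--         matched = False
--         for tok_tpl in tok_tpls:
--             if match(tok_log, tok_tpl):
--                 matched = True
--                 break
--         if not matched: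
--             missed_logs.append(tok_log)
--
--     return missed_logs
-- ===== SOURCE B (Python) =====
-- def calc_missed_logs(tok_tpls, tok_logs):
--     missed_logs = []
--     for tok_log in tok_logs:
--         # NFA-style column filtering: keep the set of still-viable templates
--         # while consuming the log one token at a time, stripping the matched head.
--         cands = [t for t in tok_tpls if len(t) == len(tok_log)]
--         for tok in tok_log:
--             cands = [t[1:] for t in cands if t and (t[0] is None or t[0] == tok)]
--         if not cands:
--             missed_logs.append(tok_log)
--     return missed_logs
-- ===== Notes on version B (the rewrite author's own statement) =====
-- stated objective: alternative
-- what changed: Per-template row scan with early break is replaced by NFA-style column filtering: for each log the set of viable templates (pre-filtered by length) is narrowed token by token, and the log is missed iff the set ends up empty.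
import Mathlib
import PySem

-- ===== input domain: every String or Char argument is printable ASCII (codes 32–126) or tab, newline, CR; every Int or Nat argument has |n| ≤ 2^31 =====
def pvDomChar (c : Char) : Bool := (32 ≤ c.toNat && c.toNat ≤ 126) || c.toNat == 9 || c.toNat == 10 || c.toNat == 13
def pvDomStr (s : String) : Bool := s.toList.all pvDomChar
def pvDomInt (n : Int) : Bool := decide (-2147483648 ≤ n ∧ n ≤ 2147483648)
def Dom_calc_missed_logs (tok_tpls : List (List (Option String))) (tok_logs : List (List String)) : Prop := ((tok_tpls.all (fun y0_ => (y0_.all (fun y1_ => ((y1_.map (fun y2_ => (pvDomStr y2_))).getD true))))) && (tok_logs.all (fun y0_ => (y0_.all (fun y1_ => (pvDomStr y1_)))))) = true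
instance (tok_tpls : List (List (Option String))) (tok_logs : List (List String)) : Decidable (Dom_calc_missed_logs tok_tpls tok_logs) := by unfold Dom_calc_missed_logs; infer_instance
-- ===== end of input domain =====

-- B replaces A's per-template row scan (with early break) by NFA-style column
-- filtering over the set of viable templates; same cost class, different algorithm.

-- ===== PORT A =====
-- the zip loop inside Python's match
def pyMatchGo : List (String × Option String) → Bool
  | [] => true
  | (l, t) :: rest => if (some l != t) && (t != none) then false else pyMatchGo rest

def pyMatch (log_toks : List String) (tpl_toks : List (Option String)) : Bool :=
  if log_toks.length ≠ tpl_toks.length then false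
  else pyMatchGo (log_toks.zip tpl_toks)

-- the inner 'for tok_tpl in tok_tpls: … break' loop
def innerA (tok_log : List String) : List (List (Option String)) → Bool
  | [] => false
  | t :: rest => if pyMatch tok_log t then true else innerA tok_log rest

def calc_missed_logs (tok_tpls : List (List (Option String))) (tok_logs : List (List String)) : List (List String) :=
  tok_logs.foldl (fun missed log => if innerA log tok_tpls then missed else missed ++ [log]) []

-- ===== PORT B =====
-- one token step: [t[1:] for t in cands if t and (t[0] is None or t[0] == tok)]
-- the per-template test-and-strip of that comprehension
def keepB (tok : String) : List (Option String) → Option (List (Option String))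
  | [] => none
  | x :: rest => if x == none || x == some tok then some rest else none

def stepB (cands : List (List (Option String))) (tok : String) : List (List (Option String)) :=
  cands.filterMap (keepB tok)

def calc_missed_logs_alt (tok_tpls : List (List (Option String))) (tok_logs : List (List String)) : List (List String) :=
  tok_logs.foldl (fun missed log =>
    let cands := log.foldl stepB (tok_tpls.filter (fun t => t.length == log.length))
    if cands.isEmpty then missed ++ [log] else missed) []

-- ===== PRECONDITION & SPEC =====
def Spec_calc_missed_logs (tok_tpls : List (List (Option String))) (tok_logs : List (List String)) (out : List (List String)) : Prop := out = calc_missed_logs_alt tok_tpls tok_logs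
instance (tok_tpls : List (List (Option String))) (tok_logs : List (List String)) (out : List (List String)) : Decidable (Spec_calc_missed_logs tok_tpls tok_logs out) := by unfold Spec_calc_missed_logs; infer_instance

-- ===== CLAIM (what is proved, stated in full; the proofs are below) =====
def Claim_equal_calc_missed_logs : Prop := ∀ (tok_tpls : List (List (Option String))) (tok_logs : List (List String)), Dom_calc_missed_logs tok_tpls tok_logs → Spec_calc_missed_logs tok_tpls tok_logs (calc_missed_logs tok_tpls tok_logs)

-- ===== LEMMAS AND PROOFS =====
-- pointwise wildcard match on a prefix of the template
def pm : List String → List (Option String) → Bool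
  | [], _ => true
  | _ :: _, [] => false
  | x :: xs, y :: ys => (y == none || y == some x) && pm xs ys

theorem innerA_eq_any (log : List String) (tpls : List (List (Option String))) :
    innerA log tpls = tpls.any (pyMatch log) := by
  induction tpls with
  | nil => rfl
  | cons t r ih =>
    cases h : pyMatch log t <;> simp [innerA, h, ih]

theorem pyMatchGo_eq_pm (log : List String) (t : List (Option String))
    (h : log.length = t.length) : pyMatchGo (log.zip t) = pm log t := by
  induction log generalizing t with
  | nil =>
    cases t with
    | nil => rfl
    | cons y ys => simp at h
  | cons x xs ih =>
    cases t with
    | nil => simp at h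
    | cons y ys =>
      simp only [List.length_cons, Nat.add_right_cancel_iff] at h
      have hrec : pyMatchGo (xs.zip ys) = pm xs ys := ih ys h
      cases y with
      | none =>
        show pyMatchGo ((x, none) :: xs.zip ys) = pm (x :: xs) (none :: ys)
        simp [pyMatchGo, pm, hrec]
      | some sv =>
        show pyMatchGo ((x, some sv) :: xs.zip ys) = pm (x :: xs) (some sv :: ys)
        by_cases hs : sv = x
        · simp [pyMatchGo, pm, hs, hrec]
        · have hx : ¬ x = sv := fun hh => hs hh.symm
          simp [pyMatchGo, pm, hs, hx]

theorem pyMatch_eq (log : List String) (t : List (Option String)) :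
    pyMatch log t = ((t.length == log.length) && pm log t) := by
  unfold pyMatch
  by_cases h : log.length = t.length
  · simp [h, pyMatchGo_eq_pm log t h]
  · have hb : (t.length == log.length) = false :=
      beq_eq_false_iff_ne.mpr (fun hh => h hh.symm)
    simp [h, hb]

theorem stepB_any (cands : List (List (Option String))) (x : String) (xs : List String) :
    (stepB cands x).any (pm xs) = cands.any (pm (x :: xs)) := by
  unfold stepB
  rw [List.any_filterMap]
  refine List.any_congr rfl (fun t => ?_)
  cases t with
  | nil => rfl
  | cons y ys =>
    rw [keepB]
    by_cases hc : (y == none || y == some x) = true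
    · have hc' : y = none ∨ y = some x := by simpa using hc
      rw [if_pos hc]
      rcases hc' with rfl | rfl <;> simp [pm]
    · cases y with
      | none => simp at hc
      | some s =>
        have hs : ¬ s = x := by simpa using hc
        rw [if_neg hc]
        simp [pm, hs]

theorem foldl_stepB_isEmpty (log : List String) (cands : List (List (Option String))) :
    (log.foldl stepB cands).isEmpty = !cands.any (pm log) := by
  induction log generalizing cands with
  | nil =>
    cases cands with
    | nil => rfl
    | cons t r => simp [pm, List.any_cons]
  | cons x xs ih =>
    simp only [List.foldl_cons]
    rw [ih, stepB_any]

theorem matched_eq (log : List String) (tpls : List (List (Option String))) :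
    (log.foldl stepB (tpls.filter (fun t => t.length == log.length))).isEmpty
      = !innerA log tpls := by
  rw [foldl_stepB_isEmpty, innerA_eq_any, List.any_filter]
  rw [List.any_congr rfl (fun t => (pyMatch_eq log t).symm)]

theorem foldl_ext {α β : Type} (f g : α → β → α) (h : ∀ a b, f a b = g a b) :
    ∀ (l : List β) (a : α), l.foldl f a = l.foldl g a := by
  intro l
  induction l with
  | nil => intro a; rfl
  | cons b r ih => intro a; simp only [List.foldl_cons, h, ih]

-- ===== VERDICT (by name: the statement is the Claim_ definition above) =====
theorem calc_missed_logs_spec : Claim_equal_calc_missed_logs := by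
  intro tok_tpls tok_logs _
  unfold Spec_calc_missed_logs calc_missed_logs calc_missed_logs_alt
  apply foldl_ext
  intro missed log
  simp only [matched_eq]
  cases h : innerA log tok_tpls <;> simp
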